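-- pv_equiv track=rewrite | github.com/MrBrantCode/unitest_baseline | mut_generate/mist_train_cf/cf_70551/solution.py | string_manipulation
-- ===== SOURCE A (Python) =====
-- def string_manipulation(s):
--     dic = {'4': '61', 'b': '62', 'c': '63', 'd': '64', '3': '65', 'f': '6b',
--            'A': 'A1', '13': '42', 'C': '43', '0': '44', 'E': '45', 'T': '46', ' ': '%20'}
--
--     if not s:
--         return ""
--
--     start = 0
--     end = len(s) - 1
--
--     while s[start] == ' ':
--         start += 1
--     while s[end] == ' ':
--         end -= 1
--     s = s[start:end+1]
--
--     res = []
--     i = 0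
--
--     while i < len(s):
--         if s[i] in dic:
--             while i + 1 < len(s) and s[i+1] == s[i]:
--                 i += 1
--             res.append(dic[s[i]])
--         else:
--             res.append(s[i])
--         i += 1
--
--     return ''.join(res)
-- ===== SOURCE B (Python) =====
-- def string_manipulation(s):
--     dic = {'4': '61', 'b': '62', 'c': '63', 'd': '64', '3': '65', 'f': '6b',
--            'A': 'A1', '13': '42', 'C': '43', '0': '44', 'E': '45', 'T': '46', ' ': '%20'}
--
--     if not s:
--         return ""
--
--     t = s.strip(' ')
--
--     # one pass: run-length decomposition of t into maximal (char, count) blocks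
--     runs = []
--     for ch in t:
--         if runs and runs[-1][0] == ch:
--             runs[-1][1] += 1
--         else:
--             runs.append([ch, 1])
--
--     return ''.join(dic[ch] if ch in dic else ch * k for ch, k in runs)
-- ===== Notes on version B (the rewrite author's own statement) =====
-- stated objective: idiomatic
-- what changed: B replaces A's manual index-walking trim loops and nested char-by-char dedup-walk by s.strip(' ') plus a single pass that builds a run-length (char, count) list which is then mapped through the dict and joined.
-- outside the precondition, e.g. on string_manipulation(' '): A raises IndexError, B returns ''
import Mathlib
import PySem

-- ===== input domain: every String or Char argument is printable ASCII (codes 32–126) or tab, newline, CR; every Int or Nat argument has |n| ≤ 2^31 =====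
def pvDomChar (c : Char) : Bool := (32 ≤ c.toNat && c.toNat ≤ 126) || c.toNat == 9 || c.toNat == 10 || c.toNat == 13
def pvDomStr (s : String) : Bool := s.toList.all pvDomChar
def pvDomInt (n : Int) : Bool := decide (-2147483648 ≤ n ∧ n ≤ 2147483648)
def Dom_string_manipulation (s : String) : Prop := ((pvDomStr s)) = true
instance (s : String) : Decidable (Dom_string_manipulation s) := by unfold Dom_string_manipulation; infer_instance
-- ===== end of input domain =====

-- B replaces A's index-walking encode loop by strip + run-length decomposition mapped through the dict (idiomatic decomposition; return value only, no mutation).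

-- ===== PORT A =====
def smDic : PySem.Dict String String := PySem.Dict.ofList
  [("4","61"),("b","62"),("c","63"),("d","64"),("3","65"),("f","6b"),
   ("A","A1"),("13","42"),("C","43"),("0","44"),("E","45"),("T","46"),(" ","%20")]

def smGet (c : Char) : Option String := PySem.Dict.get? smDic (String.ofList [c])

-- while s[start] == ' ': start += 1   (out-of-range reads return the current index; under Pre_ they never happen)
def smTrimStart (l : List Char) (i : Nat) : Nat :=
  if h : l[i]? = some ' ' then smTrimStart l (i+1) else i
  termination_by l.length - i
  decreasing_by
    have hi : i < l.length := by
      by_contra hc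
      rw [List.getElem?_eq_none (by omega)] at h
      simp at h
    omega

-- while s[end] == ' ': end -= 1   (stops at 0 instead of wrapping; under Pre_ the difference is unreachable)
def smTrimEnd (l : List Char) (e : Nat) : Nat :=
  if l[e]? = some ' ' then (if h0 : e = 0 then 0 else smTrimEnd l (e-1)) else e
  termination_by e
  decreasing_by omega

-- inner: while i + 1 < len(s) and s[i+1] == s[i]: i += 1
def smSkip (l : List Char) (i : Nat) : Nat :=
  if h : i + 1 < l.length ∧ l[i+1]? = l[i]? then smSkip l (i+1) else i
  termination_by l.length - i
  decreasing_by omega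

theorem smSkip_ge (l : List Char) (i : Nat) : i ≤ smSkip l i := by
  fun_induction smSkip l i with
  | case1 i h ih => omega
  | case2 i h => omega

-- main while loop of A; res accumulates the appended pieces
def smLoop (l : List Char) (i : Nat) (res : List (List Char)) : List (List Char) :=
  if h : i < l.length then
    if (smGet l[i]).isSome then
      let j := smSkip l i
      -- dic[s[i]] after the inner while; the ' ' default is unreachable (j stays in range)
      smLoop l (j+1) (res ++ [((smGet (l[j]?.getD ' ')).getD "").toList])
    else
      smLoop l (i+1) (res ++ [[l[i]]])
  else res
  termination_by l.length - i
  decreasing_by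
    · have := smSkip_ge l i; omega
    · omega

def string_manipulation (s : String) : String :=
  if s = "" then "" else
    let l := s.toList
    let start := smTrimStart l 0
    let e := smTrimEnd l (l.length - 1)
    let t := PySem.List.slice l (some (start : Int)) (some ((e : Int) + 1))
    String.ofList (PySem.Chars.join [] (smLoop t 0 []))

-- ===== PORT B =====
-- loop body: if runs and runs[-1][0] == ch: runs[-1][1] += 1 else: runs.append([ch, 1])
-- (runs is kept back-to-front in the accumulator and reversed at the end, the standard transcription of append-at-end)
def smStep (rs : List (Char × Nat)) (ch : Char) : List (Char × Nat) :=
  match rs with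
  | (c, k) :: rest => if c = ch then (c, k+1) :: rest else (ch, 1) :: (c, k) :: rest
  | [] => [(ch, 1)]

-- dic[ch] if ch in dic else ch * k
def smPiece (p : Char × Nat) : List Char :=
  if PySem.Dict.contains smDic (String.ofList [p.1]) then
    (PySem.Dict.getD smDic (String.ofList [p.1]) "").toList
  else List.replicate p.2 p.1

def string_manipulation_alt (s : String) : String :=
  if s = "" then "" else
    let t := PySem.Chars.stripChars s.toList [' ']
    String.ofList (PySem.Chars.join [] (((t.foldl smStep []).reverse).map smPiece))

-- ===== PRECONDITION & SPEC =====
-- Pre_ excludes exactly the nonempty all-space strings, on which A raises IndexError (the start-trimming loop runs past the end; B returns "" there).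
def Pre_string_manipulation (s : String) : Prop :=
  s = "" ∨ s.toList.any (fun c => c != ' ') = true
instance (s : String) : Decidable (Pre_string_manipulation s) := by
  unfold Pre_string_manipulation; infer_instance

def pvWitness_string_manipulation : String := " 4b c "

def Spec_string_manipulation (s : String) (out : String) : Prop := out = string_manipulation_alt s
instance (s : String) (out : String) : Decidable (Spec_string_manipulation s out) := by unfold Spec_string_manipulation; infer_instance

-- ===== CLAIM (what is proved, stated in full; the proofs are below) =====
def Claim_equal_string_manipulation : Prop := ∀ (s : String), Dom_string_manipulation s → Pre_string_manipulation s → Spec_string_manipulation s (string_manipulation s)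


-- ===== LEMMAS AND PROOFS =====

-- proof-side characterisation of the run-length decomposition
def smAltRuns (u : List Char) : List (Char × Nat) :=
  match u with
  | [] => []
  | c :: cs =>
    let n := (c :: cs).length - ((c :: cs).dropWhile (· == c)).length
    (c, n) :: smAltRuns ((c :: cs).drop n)
  termination_by u.length
  decreasing_by
    simp only [List.dropWhile_cons, beq_self_eq_true, if_true, List.length_drop, List.length_cons]
    have := List.length_dropWhile_le (· == c) cs
    omega


theorem sm_join_flatten (ps : List (List Char)) : PySem.Chars.join [] ps = ps.flatten := by
  induction ps with
  | nil => simp [PySem.Chars.join_nil]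
  | cons a t ih =>
    cases t with
    | nil => simp [PySem.Chars.join_singleton]
    | cons b t' =>
      rw [PySem.Chars.join_cons_cons]
      simp [List.flatten] at ih ⊢
      exact ih

theorem smTrimStart_eq (l : List Char) (i : Nat) :
    smTrimStart l i = i + ((l.drop i).takeWhile (· == ' ')).length := by
  fun_induction smTrimStart l i with
  | case1 i h ih =>
    have hi : i < l.length := (List.getElem?_eq_some_iff.mp h).1
    have hgi : l[i] = ' ' := (List.getElem?_eq_some_iff.mp h).2
    rw [ih, List.drop_eq_getElem_cons hi, hgi]
    simp
    omega
  | case2 i h =>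
    cases hd : l.drop i with
    | nil => simp
    | cons c cs =>
      have hc1 : l[i]? = some c := by rw [← List.head?_drop, hd]; rfl
      have hc : ¬ c = ' ' := fun hcc => h (by rw [hc1, hcc])
      simp [hc]

theorem smTrimEnd_eq (l : List Char) (e : Nat)
    (hle : ((l.take (e+1)).reverse.takeWhile (· == ' ')).length ≤ e) (he : e < l.length) :
    smTrimEnd l e = e - ((l.take (e+1)).reverse.takeWhile (· == ' ')).length := by
  revert hle he
  fun_induction smTrimEnd l e
  case case1 h =>
    intro hle he
    have hgi : l[0] = ' ' := (List.getElem?_eq_some_iff.mp h).2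
    rw [List.take_add_one, List.getElem?_eq_getElem he, hgi] at hle
    simp at hle
  case case2 e h h0 ih =>
    intro hle he
    have hgi : l[e] = ' ' := (List.getElem?_eq_some_iff.mp h).2
    have hw : (l.take (e+1)).reverse.takeWhile (· == ' ')
        = ' ' :: (l.take e).reverse.takeWhile (· == ' ') := by
      rw [List.take_add_one, List.getElem?_eq_getElem he, hgi]
      simp
    rw [hw] at hle ⊢
    have he1 : e - 1 + 1 = e := by omega
    have hrec := ih (by rw [he1]; simp at hle ⊢; omega) (by omega)
    rw [he1] at hrec
    rw [hrec]
    simp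
    omega
  case case3 e h =>
    intro hle he
    have hnc : ¬ l[e] = ' ' := fun hc => h (by rw [List.getElem?_eq_getElem he, hc])
    have hw : (l.take (e+1)).reverse.takeWhile (· == ' ') = [] := by
      rw [List.take_add_one, List.getElem?_eq_getElem he]
      rw [show (Option.some l[e]).toList = [l[e]] from rfl, List.reverse_append]
      simp [hnc]
    rw [hw]
    simp

theorem smSkip_eq (l : List Char) (i : Nat) (c : Char) (cs : List Char)
    (h : l.drop i = c :: cs) :
    smSkip l i = i + (cs.takeWhile (· == c)).length := by
  revert c cs h
  fun_induction smSkip l i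
  case case1 i hg ih =>
    intro c cs h
    have hd1 : l.drop (i+1) = cs := by
      have hdd := List.drop_drop (i := 1) (j := i) (l := l)
      rw [h] at hdd
      simpa using hdd.symm
    have hci : l[i]? = some c := by rw [← List.head?_drop, h]; rfl
    have hci1 : l[i+1]? = some c := by rw [hg.2, hci]
    have hcs : cs.head? = some c := by rw [← hd1, List.head?_drop, hci1]
    cases cs with
    | nil => simp at hcs
    | cons d cs' =>
      have hdc : d = c := by simpa using hcs
      subst hdc
      rw [ih d cs' (by rw [hd1])]
      simp
      omega
  case case2 i hg =>
    intro c cs h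
    cases cs with
    | nil => simp
    | cons d cs' =>
      have hd1 : l.drop (i+1) = d :: cs' := by
        have hdd := List.drop_drop (i := 1) (j := i) (l := l)
        rw [h] at hdd
        simpa using hdd.symm
      have hlen : i + 1 < l.length := by
        have := congrArg List.length hd1
        simp at this
        omega
      have hci : l[i]? = some c := by rw [← List.head?_drop, h]; rfl
      have hci1 : l[i+1]? = some d := by rw [← List.head?_drop, hd1]; rfl
      have hdc : ¬ d = c := by
        intro hdc
        exact hg ⟨hlen, by rw [hci1, hci, hdc]⟩
      simp [hdc]

theorem sm_takeWhile_replicate (c : Char) (cs : List Char) :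
    cs.takeWhile (· == c) = List.replicate (cs.takeWhile (· == c)).length c :=
  List.eq_replicate_of_mem (fun x hx => by
    have := List.mem_takeWhile_imp hx
    simpa using this)

theorem sm_drop_takeWhile_len (p : Char → Bool) (l : List Char) :
    l.drop (l.takeWhile p).length = l.dropWhile p := by
  have h := List.drop_left' (l₁ := l.takeWhile p) (l₂ := l.dropWhile p) rfl
  rwa [List.takeWhile_append_dropWhile] at h

theorem sm_cons_run (c : Char) (cs : List Char) :
    c :: cs = List.replicate (cs.takeWhile (· == c)).length c
      ++ (c :: cs.dropWhile (· == c)) := by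
  conv_lhs => rw [← List.takeWhile_append_dropWhile (p := (· == c)) (l := cs)]
  rw [show c :: (cs.takeWhile (· == c) ++ cs.dropWhile (· == c))
      = (c :: cs.takeWhile (· == c)) ++ cs.dropWhile (· == c) from rfl]
  rw [sm_takeWhile_replicate c cs, ← List.replicate_succ, List.replicate_succ']
  simp

theorem sm_drop_run (l : List Char) (i : Nat) (c : Char) (cs : List Char)
    (h : l.drop i = c :: cs) :
    l.drop (i + (cs.takeWhile (· == c)).length) = c :: cs.dropWhile (· == c) := by
  rw [← List.drop_drop, h, sm_cons_run c cs]
  exact List.drop_left' (by simp)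

theorem sm_len_tw (c : Char) (cs : List Char) :
    (c :: cs).length - ((c :: cs).dropWhile (· == c)).length
      = (cs.takeWhile (· == c)).length + 1 := by
  have hsp := congrArg List.length (List.takeWhile_append_dropWhile (p := (· == c)) (l := cs))
  simp only [List.length_append] at hsp
  simp only [List.dropWhile_cons, beq_self_eq_true, if_true, List.length_cons]
  omega

theorem smAltRuns_cons (c : Char) (cs : List Char) :
    smAltRuns (c :: cs) = (c, (cs.takeWhile (· == c)).length + 1)
      :: smAltRuns (cs.dropWhile (· == c)) := by
  rw [smAltRuns]
  simp only [sm_len_tw]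
  rw [List.drop_succ_cons, sm_drop_takeWhile_len]

theorem smLoop_eq (l : List Char) (i : Nat) (res : List (List Char)) :
    (smLoop l i res).flatten = res.flatten ++ ((smAltRuns (l.drop i)).map smPiece).flatten := by
  fun_induction smLoop l i res
  case case1 i res h hg j ih =>
    -- dict branch
    have hd : l.drop i = l[i] :: l.drop (i+1) := List.drop_eq_getElem_cons h
    have hj : j = i + ((l.drop (i+1)).takeWhile (· == l[i])).length := smSkip_eq l i _ _ hd
    have hdj : l.drop j = l[i] :: (l.drop (i+1)).dropWhile (· == l[i]) := by
      rw [hj]; exact sm_drop_run l i _ _ hd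
    have hgj : l[j]? = some l[i] := by rw [← List.head?_drop, hdj]; rfl
    have hdj1 : l.drop (j+1) = (l.drop (i+1)).dropWhile (· == l[i]) := by
      have hdd := List.drop_drop (i := 1) (j := j) (l := l)
      rw [hdj] at hdd
      simpa using hdd.symm
    rw [ih, hdj1, hd, smAltRuns_cons]
    simp only [List.map_cons, List.flatten_cons, List.flatten_append, List.flatten_cons]
    have hpc : smPiece (l[i], ((l.drop (i+1)).takeWhile (· == l[i])).length + 1)
        = ((smGet (l[j]?.getD ' ')).getD "").toList := by
      rw [hgj]
      simp only [Option.getD_some, smPiece]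
      rw [if_pos (by rw [PySem.Dict.contains_eq_isSome_get?]; exact hg)]
      rw [PySem.Dict.getD_eq_get?_getD]
      rfl
    rw [hpc]
    simp
  case case2 i res h hg ih =>
    -- non-dict branch
    have hd : l.drop i = l[i] :: l.drop (i+1) := List.drop_eq_getElem_cons h
    have hnc : ¬ PySem.Dict.contains smDic (String.ofList [l[i]]) = true := by
      rw [PySem.Dict.contains_eq_isSome_get?]
      simpa [smGet] using hg
    rw [ih, hd, smAltRuns_cons]
    simp only [List.map_cons, List.flatten_cons, List.flatten_append, List.flatten_cons]
    have hpc : smPiece (l[i], ((l.drop (i+1)).takeWhile (· == l[i])).length + 1)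
        = l[i] :: List.replicate ((l.drop (i+1)).takeWhile (· == l[i])).length l[i] := by
      simp only [smPiece, if_neg hnc]
      rw [List.replicate_succ]
    rw [hpc]
    -- remaining: flatten (map smPiece (smAltRuns (l.drop (i+1)))) = replicate tw c ++ flatten (map smPiece (smAltRuns ((l.drop (i+1)).dropWhile (· == l[i]))))
    cases hcs : l.drop (i+1) with
    | nil => simp
    | cons d cs' =>
      by_cases hdc : d = l[i]
      · subst hdc
        rw [smAltRuns_cons]
        simp only [List.map_cons, List.flatten_cons]
        have hpc2 : smPiece (l[i], (cs'.takeWhile (· == l[i])).length + 1)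
            = l[i] :: List.replicate (cs'.takeWhile (· == l[i])).length l[i] := by
          simp only [smPiece]
          rw [if_neg hnc, List.replicate_succ]
        rw [hpc2]
        simp [List.replicate_succ]
      · have hbeq : (d == l[i]) = false := by simpa using hdc
        simp [hbeq]
  case case3 i res h =>
    have hd : l.drop i = [] := List.drop_eq_nil_of_le (by omega)
    rw [hd, smAltRuns]
    simp

theorem sm_stripChars_eq (l : List Char) :
    PySem.Chars.stripChars l [' ']
      = ((l.dropWhile (· == ' ')).reverse.dropWhile (· == ' ')).reverse := by
  have hP : (fun c => ([' '] : List Char).contains c) = (fun c : Char => c == ' ') := by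
    funext c
    simp only [List.contains_cons, List.contains_nil, Bool.or_false]
  simp only [PySem.Chars.stripChars, hP]

theorem sm_trim_strip (l : List Char) (hl : l ≠ [])
    (hex : l.any (fun c => c != ' ') = true) :
    PySem.List.slice l (some ((smTrimStart l 0 : Nat) : Int)) (some (((smTrimEnd l (l.length - 1) : Nat) : Int) + 1))
      = PySem.Chars.stripChars l [' '] := by
  rw [sm_stripChars_eq]
  obtain ⟨x, hxl, hx⟩ := List.any_eq_true.mp hex
  have hx' : ¬ ((· == ' ') x) = true := by simpa using hx
  set f := l.dropWhile (· == ' ') with hfdef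
  set r := f.reverse.takeWhile (· == ' ') with hrdef
  set m := (f.reverse.dropWhile (· == ' ')).reverse with hmdef
  have hlsplit : l.takeWhile (· == ' ') ++ f = l := List.takeWhile_append_dropWhile
  have hfne : f ≠ [] := by
    intro h0
    apply hx'
    apply List.mem_takeWhile_imp (l := l) (p := (· == ' '))
    rw [← hlsplit] at hxl
    simpa [h0] using hxl
  have hfh : (f.head hfne == ' ') = false :=
    List.head_dropWhile_not _ hfne
  have hmem : f.head hfne ∈ f.reverse := by simp [List.head_mem]
  have hsplit2 : r ++ m.reverse = f.reverse := by
    rw [hrdef, hmdef, List.reverse_reverse]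
    exact List.takeWhile_append_dropWhile
  have hdwne : m ≠ [] := by
    intro h0
    have hin : f.head hfne ∈ r := by
      rw [← hsplit2] at hmem
      rw [h0] at hmem
      simpa using hmem
    have hmm := List.mem_takeWhile_imp hin
    rw [hfh] at hmm
    exact Bool.noConfusion hmm
  -- lengths
  have hla : (l.takeWhile (· == ' ')).length + f.length = l.length := by
    have h1 := congrArg List.length hlsplit
    rw [List.length_append] at h1
    exact h1
  have hml : r.length + m.length = f.length := by
    have h1 := congrArg List.length hsplit2
    rw [List.length_append] at h1
    simpa using h1
  have hmpos : 0 < m.length := List.length_pos_of_ne_nil hdwne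
  have hlen1 : 0 < l.length := List.length_pos_of_ne_nil hl
  have hstart : smTrimStart l 0 = (l.takeWhile (· == ' ')).length := by
    rw [smTrimStart_eq]; simp
  have hlrev : l.reverse = f.reverse ++ (l.takeWhile (· == ' ')).reverse := by
    rw [← List.reverse_append, hlsplit]
  have hwrev : (l.reverse.takeWhile (· == ' ')).length = r.length := by
    rw [hlrev, List.takeWhile_append]
    have hcond : ¬ ((List.takeWhile (fun x => x == ' ') f.reverse).length = f.reverse.length) := by
      intro hcon
      have h2 : r.length = f.length := by rw [hrdef]; simpa using hcon
      omega
    rw [if_neg hcond]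
  have hend : smTrimEnd l (l.length - 1) = (l.length - 1) - r.length := by
    rw [smTrimEnd_eq l (l.length - 1)
        (by rw [show l.length - 1 + 1 = l.length by omega, List.take_length, hwrev]; omega)
        (by omega)]
    rw [show l.length - 1 + 1 = l.length by omega, List.take_length, hwrev]
  rw [hstart, hend]
  rw [show (((l.length - 1 - r.length : Nat) : Int) + 1)
      = (((l.length - 1 - r.length + 1 : Nat)) : Int) by push_cast; ring]
  rw [PySem.List.slice_natCast]
  have hdropla : l.drop (l.takeWhile (· == ' ')).length = f := sm_drop_takeWhile_len _ l
  rw [hdropla]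
  have hfrm : f = m ++ r.reverse := by
    have h1 := congrArg List.reverse hsplit2
    simp only [List.reverse_append, List.reverse_reverse] at h1
    exact h1.symm
  rw [show l.length - 1 - r.length + 1 - (l.takeWhile (· == ' ')).length = m.length by omega]
  conv_lhs => rw [hfrm]
  exact List.take_left

theorem smStep_foldl (u : List Char) (acc : List (Char × Nat)) (c : Char) (k : Nat) :
    (u.foldl smStep ((c, k) :: acc)).reverse
      = acc.reverse ++ ((c, k + (u.takeWhile (· == c)).length) :: smAltRuns (u.dropWhile (· == c))) := by
  induction u generalizing acc c k with
  | nil =>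
    rw [List.foldl_nil, List.reverse_cons]
    rw [show List.takeWhile (· == c) [] = ([] : List Char) from rfl]
    rw [show List.dropWhile (· == c) [] = ([] : List Char) from rfl]
    rw [smAltRuns]
    simp
  | cons d ms ih =>
    rw [List.foldl_cons]
    by_cases hdc : c = d
    · subst hdc
      rw [show smStep ((c, k) :: acc) c = (c, k+1) :: acc by simp [smStep]]
      rw [ih]
      simp
      omega
    · rw [show smStep ((c, k) :: acc) d = (d, 1) :: (c, k) :: acc by simp [smStep, hdc]]
      rw [ih]
      have hbeq : (d == c) = false := by simpa using fun h => hdc h.symm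
      rw [List.takeWhile_cons, List.dropWhile_cons]
      rw [hbeq]
      simp only [Bool.false_eq_true, if_false, List.length_nil, Nat.add_zero]
      rw [smAltRuns_cons]
      simp [Nat.add_comm]

theorem smStep_runs (u : List Char) :
    (u.foldl smStep []).reverse = smAltRuns u := by
  cases u with
  | nil => rw [smAltRuns]; rfl
  | cons c cs =>
    rw [List.foldl_cons]
    rw [show smStep [] c = [(c, 1)] from rfl]
    rw [smStep_foldl cs [] c 1, smAltRuns_cons]
    simp [Nat.add_comm]

-- ===== VERDICT (by name: the statement is the Claim_ definition above) =====
theorem string_manipulation_spec : Claim_equal_string_manipulation := by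
  intro s hdom hpre
  unfold Spec_string_manipulation string_manipulation string_manipulation_alt
  by_cases hs : s = ""
  · simp [hs]
  · have hex : s.toList.any (fun c => c != ' ') = true := by
      rcases hpre with h | h
      · exact absurd h hs
      · exact h
    have hl : s.toList ≠ [] := by
      intro h0; exact hs (String.toList_eq_nil_iff.mp h0)
    simp only [if_neg hs]
    rw [sm_trim_strip s.toList hl hex]
    congr 1
    rw [sm_join_flatten, sm_join_flatten, smStep_runs]
    simpa using smLoop_eq (PySem.Chars.stripChars s.toList [' ']) 0 []
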